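-- pv_equiv track=rewrite | github.com/EdsonAugusto/Backup-Exercicios | Meus_Desafios/Criptografia/cif_Vigenere.py | lista_criptografada
-- ===== SOURCE A (Python) =====
-- from string import ascii_lowercase  # Biblioteca de caracteres
--
-- def lista_criptografada (segredo): # funcao que realiza a criptografia, recebe um parametro
-- 	lista_secreta, alfabeto = [], list(ascii_lowercase) # Variavel que armazena alfabeto secreto, Variavel alfabeto
-- 	for i in range(len(segredo)):#Laço q cria quantidades de listas e dicionarios necessarios conforme o tamanho da palavra secreta
-- 		lista_secreta.append([]); lista_secreta[i].append({}) # Adiciona uma lista na matriz e um dicionario nessa lista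
-- 		indice = alfabeto.index(segredo[i].lower()) # indice de ponto de partida p criptografia
-- 		for k in range(len(alfabeto)): # cria lista e dicionario criptografado conforme palavra chave
-- 			lista_secreta[i][0][alfabeto[k]] = alfabeto[indice] #Funcionamento da cripto:Adiciona no dicionario lista polialfabetica conforme secredo
-- 			indice+=1 # Adiciona +1 a indice p troca de caracter na proxima rodada
-- 			if indice >= len(alfabeto): indice = 0 # controle para variavel indice não estoura range maximo do alfabeto
-- 	return lista_secreta # retorna lista com dicionario criptografado
-- ===== SOURCE B (Python) =====
-- from string import ascii_lowercase
--
-- def lista_criptografada(segredo):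
--     alfabeto = list(ascii_lowercase)
--     lista_secreta = []
--     for letra in segredo:
--         indice = alfabeto.index(letra.lower())
--         rotacionado = alfabeto[indice:] + alfabeto[:indice]
--         lista_secreta.append([dict(zip(alfabeto, rotacionado))])
--     return lista_secreta
-- ===== Notes on version B (the rewrite author's own statement) =====
-- stated objective: simpler
-- what changed: Replaces the inner 26-step index-increment-with-wraparound loop that fills the dict key by key with a precomputed rotated alphabet (two slices) zipped against the alphabet, iterating directly over the characters instead of over indices.
import Mathlib
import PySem

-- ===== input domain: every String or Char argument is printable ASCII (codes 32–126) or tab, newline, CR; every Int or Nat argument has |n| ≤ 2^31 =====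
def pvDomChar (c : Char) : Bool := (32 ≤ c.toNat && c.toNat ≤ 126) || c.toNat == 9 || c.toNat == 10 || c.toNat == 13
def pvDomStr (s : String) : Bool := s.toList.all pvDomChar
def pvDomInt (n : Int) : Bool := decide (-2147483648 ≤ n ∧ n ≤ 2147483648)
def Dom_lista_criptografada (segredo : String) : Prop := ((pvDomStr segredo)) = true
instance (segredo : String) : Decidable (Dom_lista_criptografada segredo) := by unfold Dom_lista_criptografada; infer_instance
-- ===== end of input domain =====

-- B replaces A's inner index-increment-with-wraparound dict-filling loop by zipping the
-- alphabet with a rotated copy built from two slices (objective: simpler).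

-- list(ascii_lowercase): the 26 one-character lowercase strings
def pvAlf : List String := "abcdefghijklmnopqrstuvwxyz".toList.map (fun c => String.ofList [c])

-- ===== PORT A =====
-- A's inner loop: for k in range(26) fill the dict, incrementing indice with manual wraparound
def pvRowA (ind0 : Nat) : PySem.Dict String String :=
  ((PySem.List.pyRange 0 (PySem.List.len pvAlf) 1).foldl
    (fun (st : PySem.Dict String String × Nat) k =>
      let d := st.1.insert (PySem.List.pyGetD pvAlf k "") (PySem.List.pyGetD pvAlf (st.2 : Int) "")
      let ind := st.2 + 1
      (d, if ind ≥ pvAlf.length then 0 else ind))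
    (PySem.Dict.empty, ind0)).1

def lista_criptografada (segredo : String) : List (List (List (String × String))) :=
  (PySem.List.pyRange 0 (PySem.Str.len segredo) 1).foldl
    (fun lista i =>
      match PySem.List.index? pvAlf (PySem.Str.lower (String.ofList [PySem.List.pyGetD segredo.toList i ' '])) with
      | none => lista   -- alfabeto.index raises ValueError: excluded by Pre_
      | some indice => lista ++ [[(pvRowA indice).items]])
    []

-- ===== PORT B =====
def lista_criptografada_alt (segredo : String) : List (List (List (String × String))) :=
  segredo.toList.map (fun letra =>
    match PySem.List.index? pvAlf (PySem.Str.lower (String.ofList [letra])) with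
    | none => []      -- alfabeto.index raises ValueError: excluded by Pre_
    | some indice =>
      let rotacionado := PySem.List.slice pvAlf (some (indice : Int)) none ++
                         PySem.List.slice pvAlf none (some (indice : Int))
      [pvAlf.zip rotacionado])

-- ===== PRECONDITION & SPEC =====
-- Pre_ excludes exactly the strings containing a non-ASCII-letter character, on which
-- A (and B) raise ValueError from alfabeto.index.
def Pre_lista_criptografada (segredo : String) : Prop :=
  segredo.toList.all Char.isAlpha = true
instance (segredo : String) : Decidable (Pre_lista_criptografada segredo) := by
  unfold Pre_lista_criptografada; infer_instance

def pvWitness_lista_criptografada : String := "aBz"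

def Spec_lista_criptografada (segredo : String) (out : List (List (List (String × String)))) : Prop := out = lista_criptografada_alt segredo
instance (segredo : String) (out : List (List (List (String × String)))) : Decidable (Spec_lista_criptografada segredo out) := by unfold Spec_lista_criptografada; infer_instance

-- ===== CLAIM (what is proved, stated in full; the proofs are below) =====
def Claim_equal_lista_criptografada : Prop := ∀ (segredo : String), Dom_lista_criptografada segredo → Pre_lista_criptografada segredo → Spec_lista_criptografada segredo (lista_criptografada segredo)

-- ===== LEMMAS AND PROOFS =====

-- A's per-character contribution (outer-loop body, as a function of the character)
def pvG (c : Char) : List (List (List (String × String))) :=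
  match PySem.List.index? pvAlf (PySem.Str.lower (String.ofList [c])) with
  | none => []
  | some indice => [[(pvRowA indice).items]]

-- B's per-character row
def pvB (letra : Char) : List (List (String × String)) :=
  match PySem.List.index? pvAlf (PySem.Str.lower (String.ofList [letra])) with
  | none => []
  | some indice =>
    let rotacionado := PySem.List.slice pvAlf (some (indice : Int)) none ++
                       PySem.List.slice pvAlf none (some (indice : Int))
    [pvAlf.zip rotacionado]

-- A's outer fold is a fold over the characters
lemma A_eq_foldl (s : String) :
    lista_criptografada s =
      s.toList.foldl (fun lista c =>
        match PySem.List.index? pvAlf (PySem.Str.lower (String.ofList [c])) with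
        | none => lista
        | some indice => lista ++ [[(pvRowA indice).items]]) [] := by
  unfold lista_criptografada
  have := PySem.List.foldl_pyRange_zero_pyGetD' s.toList ' '
    (fun lista c =>
      match PySem.List.index? pvAlf (PySem.Str.lower (String.ofList [c])) with
      | none => lista
      | some indice => lista ++ [[(pvRowA indice).items]]) []
  simpa using this

lemma foldl_eq_flatMap (l : List Char) (acc : List (List (List (String × String)))) :
    l.foldl (fun lista c =>
        match PySem.List.index? pvAlf (PySem.Str.lower (String.ofList [c])) with
        | none => lista
        | some indice => lista ++ [[(pvRowA indice).items]]) acc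
      = acc ++ l.flatMap pvG := by
  induction l generalizing acc with
  | nil => simp
  | cons c t ih =>
    simp only [List.foldl_cons, List.flatMap_cons, ih]
    unfold pvG
    cases PySem.List.index? pvAlf (PySem.Str.lower (String.ofList [c])) <;> simp

-- the 26 rotations: A's wraparound loop produces exactly alphabet zipped with the rotated alphabet
lemma row_eq : ∀ i : Nat, i < 26 →
    (pvRowA i).items =
      pvAlf.zip (PySem.List.slice pvAlf (some (i : Int)) none ++
                 PySem.List.slice pvAlf none (some (i : Int))) := by
  decide

-- on an ASCII letter, alfabeto.index succeeds
lemma index_isSome : ∀ n : Nat, n < 128 → (Char.ofNat n).isAlpha = true →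
    (PySem.List.index? pvAlf (PySem.Str.lower (String.ofList [Char.ofNat n]))).isSome = true := by
  decide

lemma pvG_eq_pvB (c : Char) (hd : pvDomChar c = true) (ha : c.isAlpha = true) :
    pvG c = [pvB c] := by
  have hlt : c.toNat < 128 := by
    simp [pvDomChar] at hd
    omega
  have hc : Char.ofNat c.toNat = c := Char.ofNat_toNat c
  have hsome := index_isSome c.toNat hlt (by rw [hc]; exact ha)
  rw [hc] at hsome
  unfold pvG pvB
  cases h : PySem.List.index? pvAlf (PySem.Str.lower (String.ofList [c])) with
  | none => rw [h] at hsome; simp at hsome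
  | some i =>
    have hi : i < 26 := by
      obtain ⟨hk, -, -⟩ := PySem.List.getElem_of_index?_eq_some h
      have hlen : pvAlf.length = 26 := by decide
      omega
    simp [row_eq i hi]

lemma flatMap_eq_map (l : List Char) (hd : ∀ c ∈ l, pvDomChar c = true)
    (ha : ∀ c ∈ l, c.isAlpha = true) :
    l.flatMap pvG = l.map pvB := by
  induction l with
  | nil => rfl
  | cons c t ih =>
    simp only [List.flatMap_cons, List.map_cons]
    rw [pvG_eq_pvB c (hd c (by simp)) (ha c (by simp)),
        ih (fun x hx => hd x (by simp [hx])) (fun x hx => ha x (by simp [hx]))]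
    rfl

-- ===== VERDICT (by name: the statement is the Claim_ definition above) =====
theorem lista_criptografada_spec : Claim_equal_lista_criptografada := by
  intro s hdom hpre
  unfold Spec_lista_criptografada
  rw [A_eq_foldl, foldl_eq_flatMap]
  have hd : ∀ c ∈ s.toList, pvDomChar c = true := by
    intro c hc
    exact List.all_eq_true.mp hdom c hc
  have ha : ∀ c ∈ s.toList, c.isAlpha = true := by
    intro c hc
    exact List.all_eq_true.mp hpre c hc
  rw [flatMap_eq_map s.toList hd ha]
  rfl
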